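-- pv_equiv track=rewrite | github.com/sumithkumar07/ai-browser-testing | comprehensive_backend_test.py | analyze_agent_task_enhanced
-- ===== SOURCE A (Python) =====
-- def analyze_agent_task_enhanced(task):
--     """Enhanced agent task analysis matching main.js implementation"""
--     task_lower = task.lower()
--
--     scores = {
--         'research': 0,
--         'navigation': 0,
--         'shopping': 0,
--         'communication': 0,
--         'automation': 0,
--         'analysis': 0
--     }
--
--     # Enhanced Research Agent scoring
--     if any(word in task_lower for word in ['research', 'investigate', 'study']):
--         scores['research'] = 85
--         if any(word in task_lower for word in ['deep', 'comprehensive', 'detailed']):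
--             scores['research'] = 95
--     if any(word in task_lower for word in ['find', 'search', 'look up']):
--         scores['research'] = max(scores['research'], 80)
--     if any(word in task_lower for word in ['information', 'data', 'facts']):
--         scores['research'] = max(scores['research'], 75)
--
--     # Enhanced Navigation Agent scoring
--     if any(word in task_lower for word in ['go to', 'navigate to', 'visit']):
--         scores['navigation'] = 95
--     if any(word in task_lower for word in ['open', 'browse', 'website']):
--         scores['navigation'] = max(scores['navigation'], 85)
--     if any(word in task_lower for word in ['url', 'link', 'page']):
--         scores['navigation'] = max(scores['navigation'], 80)
--
--     # Enhanced Shopping Agent scoring with specific fixes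
--     if any(word in task_lower for word in ['buy', 'purchase', 'order']):
--         scores['shopping'] = 90
--     if any(word in task_lower for word in ['price', 'cost', 'compare']):
--         scores['shopping'] = max(scores['shopping'], 85)
--     if any(word in task_lower for word in ['shop', 'store', 'product']):
--         scores['shopping'] = max(scores['shopping'], 80)
--     if any(word in task_lower for word in ['deal', 'discount', 'sale']):
--         scores['shopping'] = max(scores['shopping'], 85)
--
--     # CRITICAL FIXES for shopping detection
--     if 'best' in task_lower and any(word in task_lower for word in ['laptop', 'phone', 'product', 'tablet']):
--         scores['shopping'] = max(scores['shopping'], 95)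
--     if 'find' in task_lower and any(word in task_lower for word in ['deal', 'price', 'cheap']):
--         scores['shopping'] = max(scores['shopping'], 93)
--     if 'find' in task_lower and 'best' in task_lower and any(word in task_lower for word in ['laptop', 'deals', 'phone']):
--         scores['shopping'] = 95
--         scores['research'] = 70  # Reduce research score
--     if any(word in task_lower for word in ['laptop', 'computer', 'phone', 'tablet']):
--         scores['shopping'] = max(scores['shopping'], 85)
--
--     # Enhanced Communication Agent scoring
--     if any(word in task_lower for word in ['email', 'message', 'contact']):
--         scores['communication'] = 90
--     if any(word in task_lower for word in ['write', 'compose', 'draft']):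
--         scores['communication'] = max(scores['communication'], 85)
--     if any(word in task_lower for word in ['letter', 'note', 'memo']):
--         scores['communication'] = max(scores['communication'], 80)
--
--     # Enhanced Automation Agent scoring
--     if any(word in task_lower for word in ['automate', 'schedule', 'routine']):
--         scores['automation'] = 90
--     if any(word in task_lower for word in ['workflow', 'process', 'task']):
--         scores['automation'] = max(scores['automation'], 80)
--     if any(word in task_lower for word in ['repeat', 'recurring', 'regular']):
--         scores['automation'] = max(scores['automation'], 85)
--
--     # Enhanced Analysis Agent scoring with specific fixes
--     if any(word in task_lower for word in ['analyze', 'analysis', 'examine']):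
--         scores['analysis'] = 95
--     if any(word in task_lower for word in ['summarize', 'summary', 'overview']):
--         scores['analysis'] = max(scores['analysis'], 85)
--     if any(word in task_lower for word in ['review', 'evaluate', 'assess']):
--         scores['analysis'] = max(scores['analysis'], 80)
--
--     # CRITICAL FIX for analysis detection
--     if 'analyze' in task_lower and any(word in task_lower for word in ['page', 'content', 'this']):
--         scores['analysis'] = 98
--         scores['navigation'] = 50  # Reduce navigation score
--     if any(word in task_lower for word in ['content', 'data', 'text']):
--         scores['analysis'] = max(scores['analysis'], 85)
--     if any(word in task_lower for word in ['report', 'insight', 'breakdown']):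
--         scores['analysis'] = max(scores['analysis'], 85)
--
--     return max(scores, key=scores.get)
-- ===== SOURCE B (Python) =====
-- # Different decomposition: each category's score is computed INDEPENDENTLY by a
-- # single backward scan over that category's own (condition, mode, value) ops —
-- # a fired 'set' op screens off everything before it, so scanning from the end
-- # with an early return and a running max of later 'max' ops gives the final
-- # score with no mutable shared dict; the winner is then the first category (in
-- # the original key order) attaining the maximal score.
--
-- def _hit(t, groups):
--     # AND over groups, OR over the keywords of a group
--     return all(any(w in t for w in g) for g in groups)
--
--
-- def _score(t, ops):
--     # ops in source order; scan backwards: 'max' ops after the decisive 'set'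
--     # accumulate, the last fired 'set' (if any) caps the scan.
--     acc = 0
--     for groups, is_set, value in reversed(ops):
--         if _hit(t, groups):
--             if is_set:
--                 return max(value, acc)
--             acc = max(acc, value)
--     return acc
--
--
-- _CATS = [
--     ("research", [
--         ([("research", "investigate", "study")], True, 85),
--         ([("research", "investigate", "study"), ("deep", "comprehensive", "detailed")], True, 95),
--         ([("find", "search", "look up")], False, 80),
--         ([("information", "data", "facts")], False, 75),
--         ([("find",), ("best",), ("laptop", "deals", "phone")], True, 70),
--     ]),
--     ("navigation", [
--         ([("go to", "navigate to", "visit")], True, 95),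
--         ([("open", "browse", "website")], False, 85),
--         ([("url", "link", "page")], False, 80),
--         ([("analyze",), ("page", "content", "this")], True, 50),
--     ]),
--     ("shopping", [
--         ([("buy", "purchase", "order")], True, 90),
--         ([("price", "cost", "compare")], False, 85),
--         ([("shop", "store", "product")], False, 80),
--         ([("deal", "discount", "sale")], False, 85),
--         ([("best",), ("laptop", "phone", "product", "tablet")], False, 95),
--         ([("find",), ("deal", "price", "cheap")], False, 93),
--         ([("find",), ("best",), ("laptop", "deals", "phone")], True, 95),
--         ([("laptop", "computer", "phone", "tablet")], False, 85),
--     ]),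
--     ("communication", [
--         ([("email", "message", "contact")], True, 90),
--         ([("write", "compose", "draft")], False, 85),
--         ([("letter", "note", "memo")], False, 80),
--     ]),
--     ("automation", [
--         ([("automate", "schedule", "routine")], True, 90),
--         ([("workflow", "process", "task")], False, 80),
--         ([("repeat", "recurring", "regular")], False, 85),
--     ]),
--     ("analysis", [
--         ([("analyze", "analysis", "examine")], True, 95),
--         ([("summarize", "summary", "overview")], False, 85),
--         ([("review", "evaluate", "assess")], False, 80),
--         ([("analyze",), ("page", "content", "this")], True, 98),
--         ([("content", "data", "text")], False, 85),
--         ([("report", "insight", "breakdown")], False, 85),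
--     ]),
-- ]
--
--
-- def analyze_agent_task_enhanced(task):
--     t = task.lower()
--     best_cat, best = "", -1
--     for cat, ops in _CATS:
--         s = _score(t, ops)
--         if s > best:
--             best_cat, best = cat, s
--     return best_cat
-- ===== Notes on version B (the rewrite author's own statement) =====
-- stated objective: alternative
-- what changed: B computes each category's score independently by a single backward scan over that category's own rule ops with an early return at the last fired force-assignment (which screens off everything before it), eliminating the shared mutable scores dict, then picks the winner by a first-maximum argmax fold over the categories in the original key order.
import Mathlib
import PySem

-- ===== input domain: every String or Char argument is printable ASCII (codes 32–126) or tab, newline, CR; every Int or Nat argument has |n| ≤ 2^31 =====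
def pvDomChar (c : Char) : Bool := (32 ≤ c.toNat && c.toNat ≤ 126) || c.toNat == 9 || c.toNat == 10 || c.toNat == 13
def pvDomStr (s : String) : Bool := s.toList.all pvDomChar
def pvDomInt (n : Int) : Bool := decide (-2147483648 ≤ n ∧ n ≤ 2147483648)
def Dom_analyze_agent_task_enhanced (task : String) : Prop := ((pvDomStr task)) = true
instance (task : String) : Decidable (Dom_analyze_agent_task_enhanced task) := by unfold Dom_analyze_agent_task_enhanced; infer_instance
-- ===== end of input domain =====

-- B drops A's shared mutable scores dict: each category's score is a single backward scan
-- over its own ops with early exit at the decisive 'set', then an argmax fold (objective: alternative, same cost).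

-- `any(word in task_lower for word in ws)` — A's repeated expression
def pvAnyIn (t : String) (ws : List String) : Bool := ws.any (fun w => PySem.Str.isIn w t)

-- `max(scores, key=scores.get)` — A's final line (dict is never empty here)
def pvMaxKey (d : PySem.Dict String Int) : String :=
  match PySem.List.max? d.keys (fun k => d.getD k 0) with
  | some k => k
  | none => ""

def pvScores0 : PySem.Dict String Int :=
  PySem.Dict.ofList [("research", 0), ("navigation", 0), ("shopping", 0),
                     ("communication", 0), ("automation", 0), ("analysis", 0)]

-- ===== PORT A =====
-- each pv_ai below is the literal port of ONE if-statement of A, in source order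
def pv_a1 (t : String) (s : PySem.Dict String Int) : PySem.Dict String Int :=
  if pvAnyIn t ["research", "investigate", "study"] then
    (let s2 := s.insert "research" 85
     if pvAnyIn t ["deep", "comprehensive", "detailed"] then s2.insert "research" 95 else s2)
  else s

def pv_a2 (t : String) (s : PySem.Dict String Int) : PySem.Dict String Int :=
  if pvAnyIn t ["find", "search", "look up"] then s.insert "research" (max (s.getD "research" 0) 80) else s

def pv_a3 (t : String) (s : PySem.Dict String Int) : PySem.Dict String Int :=
  if pvAnyIn t ["information", "data", "facts"] then s.insert "research" (max (s.getD "research" 0) 75) else s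

def pv_a4 (t : String) (s : PySem.Dict String Int) : PySem.Dict String Int :=
  if pvAnyIn t ["go to", "navigate to", "visit"] then s.insert "navigation" 95 else s

def pv_a5 (t : String) (s : PySem.Dict String Int) : PySem.Dict String Int :=
  if pvAnyIn t ["open", "browse", "website"] then s.insert "navigation" (max (s.getD "navigation" 0) 85) else s

def pv_a6 (t : String) (s : PySem.Dict String Int) : PySem.Dict String Int :=
  if pvAnyIn t ["url", "link", "page"] then s.insert "navigation" (max (s.getD "navigation" 0) 80) else s

def pv_a7 (t : String) (s : PySem.Dict String Int) : PySem.Dict String Int :=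
  if pvAnyIn t ["buy", "purchase", "order"] then s.insert "shopping" 90 else s

def pv_a8 (t : String) (s : PySem.Dict String Int) : PySem.Dict String Int :=
  if pvAnyIn t ["price", "cost", "compare"] then s.insert "shopping" (max (s.getD "shopping" 0) 85) else s

def pv_a9 (t : String) (s : PySem.Dict String Int) : PySem.Dict String Int :=
  if pvAnyIn t ["shop", "store", "product"] then s.insert "shopping" (max (s.getD "shopping" 0) 80) else s

def pv_a10 (t : String) (s : PySem.Dict String Int) : PySem.Dict String Int :=
  if pvAnyIn t ["deal", "discount", "sale"] then s.insert "shopping" (max (s.getD "shopping" 0) 85) else s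

def pv_a11 (t : String) (s : PySem.Dict String Int) : PySem.Dict String Int :=
  if PySem.Str.isIn "best" t && pvAnyIn t ["laptop", "phone", "product", "tablet"] then s.insert "shopping" (max (s.getD "shopping" 0) 95) else s

def pv_a12 (t : String) (s : PySem.Dict String Int) : PySem.Dict String Int :=
  if PySem.Str.isIn "find" t && pvAnyIn t ["deal", "price", "cheap"] then s.insert "shopping" (max (s.getD "shopping" 0) 93) else s

def pv_a13 (t : String) (s : PySem.Dict String Int) : PySem.Dict String Int :=
  if PySem.Str.isIn "find" t && (PySem.Str.isIn "best" t && pvAnyIn t ["laptop", "deals", "phone"]) then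
    (s.insert "shopping" 95).insert "research" 70
  else s

def pv_a14 (t : String) (s : PySem.Dict String Int) : PySem.Dict String Int :=
  if pvAnyIn t ["laptop", "computer", "phone", "tablet"] then s.insert "shopping" (max (s.getD "shopping" 0) 85) else s

def pv_a15 (t : String) (s : PySem.Dict String Int) : PySem.Dict String Int :=
  if pvAnyIn t ["email", "message", "contact"] then s.insert "communication" 90 else s

def pv_a16 (t : String) (s : PySem.Dict String Int) : PySem.Dict String Int :=
  if pvAnyIn t ["write", "compose", "draft"] then s.insert "communication" (max (s.getD "communication" 0) 85) else s

def pv_a17 (t : String) (s : PySem.Dict String Int) : PySem.Dict String Int :=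
  if pvAnyIn t ["letter", "note", "memo"] then s.insert "communication" (max (s.getD "communication" 0) 80) else s

def pv_a18 (t : String) (s : PySem.Dict String Int) : PySem.Dict String Int :=
  if pvAnyIn t ["automate", "schedule", "routine"] then s.insert "automation" 90 else s

def pv_a19 (t : String) (s : PySem.Dict String Int) : PySem.Dict String Int :=
  if pvAnyIn t ["workflow", "process", "task"] then s.insert "automation" (max (s.getD "automation" 0) 80) else s

def pv_a20 (t : String) (s : PySem.Dict String Int) : PySem.Dict String Int :=
  if pvAnyIn t ["repeat", "recurring", "regular"] then s.insert "automation" (max (s.getD "automation" 0) 85) else s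

def pv_a21 (t : String) (s : PySem.Dict String Int) : PySem.Dict String Int :=
  if pvAnyIn t ["analyze", "analysis", "examine"] then s.insert "analysis" 95 else s

def pv_a22 (t : String) (s : PySem.Dict String Int) : PySem.Dict String Int :=
  if pvAnyIn t ["summarize", "summary", "overview"] then s.insert "analysis" (max (s.getD "analysis" 0) 85) else s

def pv_a23 (t : String) (s : PySem.Dict String Int) : PySem.Dict String Int :=
  if pvAnyIn t ["review", "evaluate", "assess"] then s.insert "analysis" (max (s.getD "analysis" 0) 80) else s

def pv_a24 (t : String) (s : PySem.Dict String Int) : PySem.Dict String Int :=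
  if PySem.Str.isIn "analyze" t && pvAnyIn t ["page", "content", "this"] then
    (s.insert "analysis" 98).insert "navigation" 50
  else s

def pv_a25 (t : String) (s : PySem.Dict String Int) : PySem.Dict String Int :=
  if pvAnyIn t ["content", "data", "text"] then s.insert "analysis" (max (s.getD "analysis" 0) 85) else s

def pv_a26 (t : String) (s : PySem.Dict String Int) : PySem.Dict String Int :=
  if pvAnyIn t ["report", "insight", "breakdown"] then s.insert "analysis" (max (s.getD "analysis" 0) 85) else s

def analyze_agent_task_enhanced (task : String) : String :=
  let t := PySem.Str.lower task
  pvMaxKey (pv_a26 t (pv_a25 t (pv_a24 t (pv_a23 t (pv_a22 t (pv_a21 t (pv_a20 t (pv_a19 t (pv_a18 t (pv_a17 t (pv_a16 t (pv_a15 t (pv_a14 t (pv_a13 t (pv_a12 t (pv_a11 t (pv_a10 t (pv_a9 t (pv_a8 t (pv_a7 t (pv_a6 t (pv_a5 t (pv_a4 t (pv_a3 t (pv_a2 t (pv_a1 t pvScores0))))))))))))))))))))))))))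

-- ===== PORT B =====
-- Source B's `_hit`: AND over groups, OR over the keywords of a group
def pvHit (t : String) (groups : List (List String)) : Bool :=
  groups.all (fun g => g.any (fun w => PySem.Str.isIn w t))

-- Source B's `_score` loop body: backward scan with early return at a fired 'set'
def pvScoreRev (t : String) (acc : Int) : List (List (List String) × Bool × Int) → Int
  | [] => acc
  | op :: rest =>
    if pvHit t op.1 then
      (if op.2.1 then max op.2.2 acc else pvScoreRev t (max acc op.2.2) rest)
    else pvScoreRev t acc rest

def pvScore (t : String) (ops : List (List (List String) × Bool × Int)) : Int :=
  pvScoreRev t 0 ops.reverse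

def pvOpsResearch : List (List (List String) × Bool × Int) :=
  [ ([["research", "investigate", "study"]], true, 85),
    ([["research", "investigate", "study"], ["deep", "comprehensive", "detailed"]], true, 95),
    ([["find", "search", "look up"]], false, 80),
    ([["information", "data", "facts"]], false, 75),
    ([["find"], ["best"], ["laptop", "deals", "phone"]], true, 70) ]

def pvOpsNavigation : List (List (List String) × Bool × Int) :=
  [ ([["go to", "navigate to", "visit"]], true, 95),
    ([["open", "browse", "website"]], false, 85),
    ([["url", "link", "page"]], false, 80),
    ([["analyze"], ["page", "content", "this"]], true, 50) ]

def pvOpsShopping : List (List (List String) × Bool × Int) :=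
  [ ([["buy", "purchase", "order"]], true, 90),
    ([["price", "cost", "compare"]], false, 85),
    ([["shop", "store", "product"]], false, 80),
    ([["deal", "discount", "sale"]], false, 85),
    ([["best"], ["laptop", "phone", "product", "tablet"]], false, 95),
    ([["find"], ["deal", "price", "cheap"]], false, 93),
    ([["find"], ["best"], ["laptop", "deals", "phone"]], true, 95),
    ([["laptop", "computer", "phone", "tablet"]], false, 85) ]

def pvOpsCommunication : List (List (List String) × Bool × Int) :=
  [ ([["email", "message", "contact"]], true, 90),
    ([["write", "compose", "draft"]], false, 85),
    ([["letter", "note", "memo"]], false, 80) ]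

def pvOpsAutomation : List (List (List String) × Bool × Int) :=
  [ ([["automate", "schedule", "routine"]], true, 90),
    ([["workflow", "process", "task"]], false, 80),
    ([["repeat", "recurring", "regular"]], false, 85) ]

def pvOpsAnalysis : List (List (List String) × Bool × Int) :=
  [ ([["analyze", "analysis", "examine"]], true, 95),
    ([["summarize", "summary", "overview"]], false, 85),
    ([["review", "evaluate", "assess"]], false, 80),
    ([["analyze"], ["page", "content", "this"]], true, 98),
    ([["content", "data", "text"]], false, 85),
    ([["report", "insight", "breakdown"]], false, 85) ]

def pvCats : List (String × List (List (List String) × Bool × Int)) :=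
  [ ("research", pvOpsResearch), ("navigation", pvOpsNavigation), ("shopping", pvOpsShopping),
    ("communication", pvOpsCommunication), ("automation", pvOpsAutomation), ("analysis", pvOpsAnalysis) ]

-- the body of Source B's final loop: keep the first category attaining the maximal score
def pvStep (t : String) (best : String × Int) (c : String × List (List (List String) × Bool × Int)) : String × Int :=
  let s := pvScore t c.2
  if s > best.2 then (c.1, s) else best

def analyze_agent_task_enhanced_alt (task : String) : String :=
  let t := PySem.Str.lower task
  (pvCats.foldl (pvStep t) ("", -1)).1

-- ===== PRECONDITION & SPEC =====
def Spec_analyze_agent_task_enhanced (task : String) (out : String) : Prop := out = analyze_agent_task_enhanced_alt task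
instance (task : String) (out : String) : Decidable (Spec_analyze_agent_task_enhanced task out) := by unfold Spec_analyze_agent_task_enhanced; infer_instance

-- ===== CLAIM (what is proved, stated in full; the proofs are below) =====
def Claim_equal_analyze_agent_task_enhanced : Prop := ∀ (task : String), Dom_analyze_agent_task_enhanced task → Spec_analyze_agent_task_enhanced task (analyze_agent_task_enhanced task)

-- ===== LEMMAS AND PROOFS =====

-- proof-side helpers: the six-key dict as a record of its values, and set/max update combinators
def pvD6 (r n s c a z : Int) : PySem.Dict String Int :=
  PySem.Dict.ofList [("research", r), ("navigation", n), ("shopping", s),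
                     ("communication", c), ("automation", a), ("analysis", z)]

def pvUpd (b : Bool) (x v : Int) : Int := if b then max x v else x
def pvSet (b : Bool) (x v : Int) : Int := if b then v else x

def pvStep2 (best : String × Int) (p : String × Int) : String × Int :=
  if p.2 > best.2 then p else best

def pvStepA (d : PySem.Dict String Int) (acc : Option String) (x : String) : Option String :=
  match acc with
  | none => some x
  | some m => if d.getD m 0 < d.getD x 0 then some x else some m

theorem pvKeys6 (r n s c a z : Int) : (pvD6 r n s c a z).keys = ["research", "navigation", "shopping", "communication", "automation", "analysis"] := rfl
theorem pvG1 (r n s c a z : Int) : (pvD6 r n s c a z).getD "research" 0 = r := rfl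
theorem pvG2 (r n s c a z : Int) : (pvD6 r n s c a z).getD "navigation" 0 = n := rfl
theorem pvG3 (r n s c a z : Int) : (pvD6 r n s c a z).getD "shopping" 0 = s := rfl
theorem pvG4 (r n s c a z : Int) : (pvD6 r n s c a z).getD "communication" 0 = c := rfl
theorem pvG5 (r n s c a z : Int) : (pvD6 r n s c a z).getD "automation" 0 = a := rfl
theorem pvG6 (r n s c a z : Int) : (pvD6 r n s c a z).getD "analysis" 0 = z := rfl

-- the running-max foldl inside PySem.List.max? tracks the first-max argmax fold
theorem pvFoldRel (d : PySem.Dict String Int) (ks : List String) :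
    ∀ (m : String),
    List.foldl (pvStepA d) (some m) ks
    = some ((List.foldl (fun best k => if d.getD k 0 > best.2 then (k, d.getD k 0) else best) (m, d.getD m 0) ks).1) := by
  induction ks with
  | nil => intro m; rfl
  | cons x xs ih =>
    intro m
    simp only [List.foldl_cons, pvStepA]
    by_cases h : d.getD m 0 < d.getD x 0
    · rw [if_pos h, if_pos (by exact h), ih]
    · rw [if_neg h, if_neg (by exact h), ih]

theorem pvMax?eq (d : PySem.Dict String Int) (ks : List String) :
    PySem.List.max? ks (fun k => d.getD k 0) = List.foldl (pvStepA d) none ks := by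
  unfold PySem.List.max?
  apply List.foldl_ext
  intro acc b hb
  cases acc <;> rfl

-- A's `max(scores, key=scores.get)` agrees with B's first-max argmax fold on the six keys
theorem pvMaxKey6 (r n s c a z : Int) (hr : 0 ≤ r) :
    pvMaxKey (pvD6 r n s c a z) =
    (pvStep2 (pvStep2 (pvStep2 (pvStep2 (pvStep2 (pvStep2 ("", -1) ("research", r)) ("navigation", n)) ("shopping", s)) ("communication", c)) ("automation", a)) ("analysis", z)).1 := by
  have h0 : pvStep2 ("", -1) ("research", r) = ("research", r) := by
    simp only [pvStep2]; rw [if_pos (by simp; omega)]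
  rw [h0]
  unfold pvMaxKey
  rw [pvKeys6, pvMax?eq, List.foldl_cons]
  rw [show pvStepA (pvD6 r n s c a z) none "research" = some "research" from rfl]
  rw [pvFoldRel]
  simp only [List.foldl_cons, List.foldl_nil, pvG1, pvG2, pvG3, pvG4, pvG5, pvG6, pvStep2]

theorem pvL1 (t : String) (r n s c a z : Int) :
    pv_a1 t (pvD6 r n s c a z) = pvD6 (pvSet (pvAnyIn t ["research", "investigate", "study"]) r (if pvAnyIn t ["deep", "comprehensive", "detailed"] then (95:Int) else 85)) (n) (s) (c) (a) (z) := by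
  simp only [pv_a1, pvSet]
  split_ifs <;> rfl

theorem pvL2 (t : String) (r n s c a z : Int) :
    pv_a2 t (pvD6 r n s c a z) = pvD6 (pvUpd (pvAnyIn t ["find", "search", "look up"]) r 80) (n) (s) (c) (a) (z) := by
  simp only [pv_a2, pvUpd]
  split_ifs <;> rfl

theorem pvL3 (t : String) (r n s c a z : Int) :
    pv_a3 t (pvD6 r n s c a z) = pvD6 (pvUpd (pvAnyIn t ["information", "data", "facts"]) r 75) (n) (s) (c) (a) (z) := by
  simp only [pv_a3, pvUpd]
  split_ifs <;> rfl

theorem pvL4 (t : String) (r n s c a z : Int) :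
    pv_a4 t (pvD6 r n s c a z) = pvD6 (r) (pvSet (pvAnyIn t ["go to", "navigate to", "visit"]) n 95) (s) (c) (a) (z) := by
  simp only [pv_a4, pvSet]
  split_ifs <;> rfl

theorem pvL5 (t : String) (r n s c a z : Int) :
    pv_a5 t (pvD6 r n s c a z) = pvD6 (r) (pvUpd (pvAnyIn t ["open", "browse", "website"]) n 85) (s) (c) (a) (z) := by
  simp only [pv_a5, pvUpd]
  split_ifs <;> rfl

theorem pvL6 (t : String) (r n s c a z : Int) :
    pv_a6 t (pvD6 r n s c a z) = pvD6 (r) (pvUpd (pvAnyIn t ["url", "link", "page"]) n 80) (s) (c) (a) (z) := by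
  simp only [pv_a6, pvUpd]
  split_ifs <;> rfl

theorem pvL7 (t : String) (r n s c a z : Int) :
    pv_a7 t (pvD6 r n s c a z) = pvD6 (r) (n) (pvSet (pvAnyIn t ["buy", "purchase", "order"]) s 90) (c) (a) (z) := by
  simp only [pv_a7, pvSet]
  split_ifs <;> rfl

theorem pvL8 (t : String) (r n s c a z : Int) :
    pv_a8 t (pvD6 r n s c a z) = pvD6 (r) (n) (pvUpd (pvAnyIn t ["price", "cost", "compare"]) s 85) (c) (a) (z) := by
  simp only [pv_a8, pvUpd]
  split_ifs <;> rfl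

theorem pvL9 (t : String) (r n s c a z : Int) :
    pv_a9 t (pvD6 r n s c a z) = pvD6 (r) (n) (pvUpd (pvAnyIn t ["shop", "store", "product"]) s 80) (c) (a) (z) := by
  simp only [pv_a9, pvUpd]
  split_ifs <;> rfl

theorem pvL10 (t : String) (r n s c a z : Int) :
    pv_a10 t (pvD6 r n s c a z) = pvD6 (r) (n) (pvUpd (pvAnyIn t ["deal", "discount", "sale"]) s 85) (c) (a) (z) := by
  simp only [pv_a10, pvUpd]
  split_ifs <;> rfl

theorem pvL11 (t : String) (r n s c a z : Int) :
    pv_a11 t (pvD6 r n s c a z) = pvD6 (r) (n) (pvUpd (PySem.Str.isIn "best" t && pvAnyIn t ["laptop", "phone", "product", "tablet"]) s 95) (c) (a) (z) := by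
  simp only [pv_a11, pvUpd]
  split_ifs <;> rfl

theorem pvL12 (t : String) (r n s c a z : Int) :
    pv_a12 t (pvD6 r n s c a z) = pvD6 (r) (n) (pvUpd (PySem.Str.isIn "find" t && pvAnyIn t ["deal", "price", "cheap"]) s 93) (c) (a) (z) := by
  simp only [pv_a12, pvUpd]
  split_ifs <;> rfl

theorem pvL13 (t : String) (r n s c a z : Int) :
    pv_a13 t (pvD6 r n s c a z) = pvD6 (pvSet (PySem.Str.isIn "find" t && (PySem.Str.isIn "best" t && pvAnyIn t ["laptop", "deals", "phone"])) r 70) (n) (pvSet (PySem.Str.isIn "find" t && (PySem.Str.isIn "best" t && pvAnyIn t ["laptop", "deals", "phone"])) s 95) (c) (a) (z) := by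
  simp only [pv_a13, pvSet]
  split_ifs <;> rfl

theorem pvL14 (t : String) (r n s c a z : Int) :
    pv_a14 t (pvD6 r n s c a z) = pvD6 (r) (n) (pvUpd (pvAnyIn t ["laptop", "computer", "phone", "tablet"]) s 85) (c) (a) (z) := by
  simp only [pv_a14, pvUpd]
  split_ifs <;> rfl

theorem pvL15 (t : String) (r n s c a z : Int) :
    pv_a15 t (pvD6 r n s c a z) = pvD6 (r) (n) (s) (pvSet (pvAnyIn t ["email", "message", "contact"]) c 90) (a) (z) := by
  simp only [pv_a15, pvSet]
  split_ifs <;> rfl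

theorem pvL16 (t : String) (r n s c a z : Int) :
    pv_a16 t (pvD6 r n s c a z) = pvD6 (r) (n) (s) (pvUpd (pvAnyIn t ["write", "compose", "draft"]) c 85) (a) (z) := by
  simp only [pv_a16, pvUpd]
  split_ifs <;> rfl

theorem pvL17 (t : String) (r n s c a z : Int) :
    pv_a17 t (pvD6 r n s c a z) = pvD6 (r) (n) (s) (pvUpd (pvAnyIn t ["letter", "note", "memo"]) c 80) (a) (z) := by
  simp only [pv_a17, pvUpd]
  split_ifs <;> rfl

theorem pvL18 (t : String) (r n s c a z : Int) :
    pv_a18 t (pvD6 r n s c a z) = pvD6 (r) (n) (s) (c) (pvSet (pvAnyIn t ["automate", "schedule", "routine"]) a 90) (z) := by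
  simp only [pv_a18, pvSet]
  split_ifs <;> rfl

theorem pvL19 (t : String) (r n s c a z : Int) :
    pv_a19 t (pvD6 r n s c a z) = pvD6 (r) (n) (s) (c) (pvUpd (pvAnyIn t ["workflow", "process", "task"]) a 80) (z) := by
  simp only [pv_a19, pvUpd]
  split_ifs <;> rfl

theorem pvL20 (t : String) (r n s c a z : Int) :
    pv_a20 t (pvD6 r n s c a z) = pvD6 (r) (n) (s) (c) (pvUpd (pvAnyIn t ["repeat", "recurring", "regular"]) a 85) (z) := by
  simp only [pv_a20, pvUpd]
  split_ifs <;> rfl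

theorem pvL21 (t : String) (r n s c a z : Int) :
    pv_a21 t (pvD6 r n s c a z) = pvD6 (r) (n) (s) (c) (a) (pvSet (pvAnyIn t ["analyze", "analysis", "examine"]) z 95) := by
  simp only [pv_a21, pvSet]
  split_ifs <;> rfl

theorem pvL22 (t : String) (r n s c a z : Int) :
    pv_a22 t (pvD6 r n s c a z) = pvD6 (r) (n) (s) (c) (a) (pvUpd (pvAnyIn t ["summarize", "summary", "overview"]) z 85) := by
  simp only [pv_a22, pvUpd]
  split_ifs <;> rfl

theorem pvL23 (t : String) (r n s c a z : Int) :
    pv_a23 t (pvD6 r n s c a z) = pvD6 (r) (n) (s) (c) (a) (pvUpd (pvAnyIn t ["review", "evaluate", "assess"]) z 80) := by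
  simp only [pv_a23, pvUpd]
  split_ifs <;> rfl

theorem pvL24 (t : String) (r n s c a z : Int) :
    pv_a24 t (pvD6 r n s c a z) = pvD6 (r) (pvSet (PySem.Str.isIn "analyze" t && pvAnyIn t ["page", "content", "this"]) n 50) (s) (c) (a) (pvSet (PySem.Str.isIn "analyze" t && pvAnyIn t ["page", "content", "this"]) z 98) := by
  simp only [pv_a24, pvSet]
  split_ifs <;> rfl

theorem pvL25 (t : String) (r n s c a z : Int) :
    pv_a25 t (pvD6 r n s c a z) = pvD6 (r) (n) (s) (c) (a) (pvUpd (pvAnyIn t ["content", "data", "text"]) z 85) := by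
  simp only [pv_a25, pvUpd]
  split_ifs <;> rfl

theorem pvL26 (t : String) (r n s c a z : Int) :
    pv_a26 t (pvD6 r n s c a z) = pvD6 (r) (n) (s) (c) (a) (pvUpd (pvAnyIn t ["report", "insight", "breakdown"]) z 85) := by
  simp only [pv_a26, pvUpd]
  split_ifs <;> rfl

theorem pvCatR (t : String) :
    pvSet (PySem.Str.isIn "find" t && (PySem.Str.isIn "best" t && pvAnyIn t ["laptop", "deals", "phone"])) (pvUpd (pvAnyIn t ["information", "data", "facts"]) (pvUpd (pvAnyIn t ["find", "search", "look up"]) (pvSet (pvAnyIn t ["research", "investigate", "study"]) 0 (if pvAnyIn t ["deep", "comprehensive", "detailed"] then (95:Int) else 85)) 80) 75) 70 = pvScore t pvOpsResearch := by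
  simp only [pvScore, pvOpsResearch, List.reverse_cons, List.reverse_nil, List.nil_append,
    List.cons_append, pvScoreRev, pvHit, pvAnyIn, List.all_cons, List.all_nil, List.any_cons,
    List.any_nil, Bool.and_true, Bool.or_false, pvUpd, pvSet]
  generalize (PySem.Str.isIn "find" t && (PySem.Str.isIn "best" t && (PySem.Str.isIn "laptop" t || (PySem.Str.isIn "deals" t || PySem.Str.isIn "phone" t)))) = b1
  generalize (PySem.Str.isIn "research" t || (PySem.Str.isIn "investigate" t || PySem.Str.isIn "study" t)) = b2
  generalize (PySem.Str.isIn "deep" t || (PySem.Str.isIn "comprehensive" t || PySem.Str.isIn "detailed" t)) = b3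
  generalize (PySem.Str.isIn "find" t || (PySem.Str.isIn "search" t || PySem.Str.isIn "look up" t)) = b4
  generalize (PySem.Str.isIn "information" t || (PySem.Str.isIn "data" t || PySem.Str.isIn "facts" t)) = b5
  revert b1 b2 b3 b4 b5
  decide

theorem pvCatN (t : String) :
    pvSet (PySem.Str.isIn "analyze" t && pvAnyIn t ["page", "content", "this"]) (pvUpd (pvAnyIn t ["url", "link", "page"]) (pvUpd (pvAnyIn t ["open", "browse", "website"]) (pvSet (pvAnyIn t ["go to", "navigate to", "visit"]) 0 95) 85) 80) 50 = pvScore t pvOpsNavigation := by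
  simp only [pvScore, pvOpsNavigation, List.reverse_cons, List.reverse_nil, List.nil_append,
    List.cons_append, pvScoreRev, pvHit, pvAnyIn, List.all_cons, List.all_nil, List.any_cons,
    List.any_nil, Bool.and_true, Bool.or_false, pvUpd, pvSet]
  generalize (PySem.Str.isIn "analyze" t && (PySem.Str.isIn "page" t || (PySem.Str.isIn "content" t || PySem.Str.isIn "this" t))) = b1
  generalize (PySem.Str.isIn "go to" t || (PySem.Str.isIn "navigate to" t || PySem.Str.isIn "visit" t)) = b2
  generalize (PySem.Str.isIn "open" t || (PySem.Str.isIn "browse" t || PySem.Str.isIn "website" t)) = b3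
  generalize (PySem.Str.isIn "url" t || (PySem.Str.isIn "link" t || PySem.Str.isIn "page" t)) = b4
  revert b1 b2 b3 b4
  decide

theorem pvCatS (t : String) :
    pvUpd (pvAnyIn t ["laptop", "computer", "phone", "tablet"]) (pvSet (PySem.Str.isIn "find" t && (PySem.Str.isIn "best" t && pvAnyIn t ["laptop", "deals", "phone"])) (pvUpd (PySem.Str.isIn "find" t && pvAnyIn t ["deal", "price", "cheap"]) (pvUpd (PySem.Str.isIn "best" t && pvAnyIn t ["laptop", "phone", "product", "tablet"]) (pvUpd (pvAnyIn t ["deal", "discount", "sale"]) (pvUpd (pvAnyIn t ["shop", "store", "product"]) (pvUpd (pvAnyIn t ["price", "cost", "compare"]) (pvSet (pvAnyIn t ["buy", "purchase", "order"]) 0 90) 85) 80) 85) 95) 93) 95) 85 = pvScore t pvOpsShopping := by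
  simp only [pvScore, pvOpsShopping, List.reverse_cons, List.reverse_nil, List.nil_append,
    List.cons_append, pvScoreRev, pvHit, pvAnyIn, List.all_cons, List.all_nil, List.any_cons,
    List.any_nil, Bool.and_true, Bool.or_false, pvUpd, pvSet]
  generalize (PySem.Str.isIn "find" t && (PySem.Str.isIn "best" t && (PySem.Str.isIn "laptop" t || (PySem.Str.isIn "deals" t || PySem.Str.isIn "phone" t)))) = b1
  generalize (PySem.Str.isIn "find" t && (PySem.Str.isIn "deal" t || (PySem.Str.isIn "price" t || PySem.Str.isIn "cheap" t))) = b2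
  generalize (PySem.Str.isIn "best" t && (PySem.Str.isIn "laptop" t || (PySem.Str.isIn "phone" t || (PySem.Str.isIn "product" t || PySem.Str.isIn "tablet" t)))) = b3
  generalize (PySem.Str.isIn "buy" t || (PySem.Str.isIn "purchase" t || PySem.Str.isIn "order" t)) = b4
  generalize (PySem.Str.isIn "price" t || (PySem.Str.isIn "cost" t || PySem.Str.isIn "compare" t)) = b5
  generalize (PySem.Str.isIn "shop" t || (PySem.Str.isIn "store" t || PySem.Str.isIn "product" t)) = b6
  generalize (PySem.Str.isIn "deal" t || (PySem.Str.isIn "discount" t || PySem.Str.isIn "sale" t)) = b7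
  generalize (PySem.Str.isIn "laptop" t || (PySem.Str.isIn "computer" t || (PySem.Str.isIn "phone" t || PySem.Str.isIn "tablet" t))) = b8
  revert b1 b2 b3 b4 b5 b6 b7 b8
  decide

theorem pvCatC (t : String) :
    pvUpd (pvAnyIn t ["letter", "note", "memo"]) (pvUpd (pvAnyIn t ["write", "compose", "draft"]) (pvSet (pvAnyIn t ["email", "message", "contact"]) 0 90) 85) 80 = pvScore t pvOpsCommunication := by
  simp only [pvScore, pvOpsCommunication, List.reverse_cons, List.reverse_nil, List.nil_append,
    List.cons_append, pvScoreRev, pvHit, pvAnyIn, List.all_cons, List.all_nil, List.any_cons,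
    List.any_nil, Bool.and_true, Bool.or_false, pvUpd, pvSet]
  generalize (PySem.Str.isIn "email" t || (PySem.Str.isIn "message" t || PySem.Str.isIn "contact" t)) = b1
  generalize (PySem.Str.isIn "write" t || (PySem.Str.isIn "compose" t || PySem.Str.isIn "draft" t)) = b2
  generalize (PySem.Str.isIn "letter" t || (PySem.Str.isIn "note" t || PySem.Str.isIn "memo" t)) = b3
  revert b1 b2 b3
  decide

theorem pvCatA (t : String) :
    pvUpd (pvAnyIn t ["repeat", "recurring", "regular"]) (pvUpd (pvAnyIn t ["workflow", "process", "task"]) (pvSet (pvAnyIn t ["automate", "schedule", "routine"]) 0 90) 80) 85 = pvScore t pvOpsAutomation := by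
  simp only [pvScore, pvOpsAutomation, List.reverse_cons, List.reverse_nil, List.nil_append,
    List.cons_append, pvScoreRev, pvHit, pvAnyIn, List.all_cons, List.all_nil, List.any_cons,
    List.any_nil, Bool.and_true, Bool.or_false, pvUpd, pvSet]
  generalize (PySem.Str.isIn "automate" t || (PySem.Str.isIn "schedule" t || PySem.Str.isIn "routine" t)) = b1
  generalize (PySem.Str.isIn "workflow" t || (PySem.Str.isIn "process" t || PySem.Str.isIn "task" t)) = b2
  generalize (PySem.Str.isIn "repeat" t || (PySem.Str.isIn "recurring" t || PySem.Str.isIn "regular" t)) = b3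
  revert b1 b2 b3
  decide

theorem pvCatZ (t : String) :
    pvUpd (pvAnyIn t ["report", "insight", "breakdown"]) (pvUpd (pvAnyIn t ["content", "data", "text"]) (pvSet (PySem.Str.isIn "analyze" t && pvAnyIn t ["page", "content", "this"]) (pvUpd (pvAnyIn t ["review", "evaluate", "assess"]) (pvUpd (pvAnyIn t ["summarize", "summary", "overview"]) (pvSet (pvAnyIn t ["analyze", "analysis", "examine"]) 0 95) 85) 80) 98) 85) 85 = pvScore t pvOpsAnalysis := by
  simp only [pvScore, pvOpsAnalysis, List.reverse_cons, List.reverse_nil, List.nil_append,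
    List.cons_append, pvScoreRev, pvHit, pvAnyIn, List.all_cons, List.all_nil, List.any_cons,
    List.any_nil, Bool.and_true, Bool.or_false, pvUpd, pvSet]
  generalize (PySem.Str.isIn "analyze" t && (PySem.Str.isIn "page" t || (PySem.Str.isIn "content" t || PySem.Str.isIn "this" t))) = b1
  generalize (PySem.Str.isIn "analyze" t || (PySem.Str.isIn "analysis" t || PySem.Str.isIn "examine" t)) = b2
  generalize (PySem.Str.isIn "summarize" t || (PySem.Str.isIn "summary" t || PySem.Str.isIn "overview" t)) = b3
  generalize (PySem.Str.isIn "review" t || (PySem.Str.isIn "evaluate" t || PySem.Str.isIn "assess" t)) = b4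
  generalize (PySem.Str.isIn "content" t || (PySem.Str.isIn "data" t || PySem.Str.isIn "text" t)) = b5
  generalize (PySem.Str.isIn "report" t || (PySem.Str.isIn "insight" t || PySem.Str.isIn "breakdown" t)) = b6
  revert b1 b2 b3 b4 b5 b6
  decide


theorem pvStepEq (t : String) (best : String × Int) (k : String) (ops : List (List (List String) × Bool × Int)) :
    pvStep t best (k, ops) = pvStep2 best (k, pvScore t ops) := rfl

theorem pvScores0_eq : pvScores0 = pvD6 0 0 0 0 0 0 := rfl

theorem pvNonnegR (t : String) : 0 ≤ pvScore t pvOpsResearch := by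
  rw [← pvCatR]
  unfold pvSet pvUpd
  split_ifs <;> decide

theorem pvKey (task : String) : analyze_agent_task_enhanced task = analyze_agent_task_enhanced_alt task := by
  simp only [analyze_agent_task_enhanced, analyze_agent_task_enhanced_alt, pvScores0_eq,
    pvL1, pvL2, pvL3, pvL4, pvL5, pvL6, pvL7, pvL8, pvL9, pvL10, pvL11, pvL12, pvL13,
    pvL14, pvL15, pvL16, pvL17, pvL18, pvL19, pvL20, pvL21, pvL22, pvL23, pvL24, pvL25, pvL26]
  rw [pvCatR, pvCatN, pvCatS, pvCatC, pvCatA, pvCatZ]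
  simp only [pvCats, List.foldl_cons, List.foldl_nil, pvStepEq]
  exact pvMaxKey6 _ _ _ _ _ _ (pvNonnegR _)

-- ===== VERDICT (by name: the statement is the Claim_ definition above) =====
theorem analyze_agent_task_enhanced_spec : Claim_equal_analyze_agent_task_enhanced := by
  intro task _
  exact (pvKey task).symm ▸ rfl
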